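-- pv_equiv track=rewrite | github.com/rsriram717/expense_tracker | model_analyzer.py | similar_terms
-- ===== SOURCE A (Python) =====
-- def similar_terms(term1, term2):
--     """Check if two terms might be similar or related"""
--     # Split into words
--     words1 = set(term1.lower().split())
--     words2 = set(term2.lower().split())
--
--     # Check for common words
--     common_words = words1.intersection(words2)
--     if common_words:
--         return True
--
--     # Check for word pairs that might be related
--     related_pairs = [
--         ('food', 'restaurants'),
--         ('food', 'dining'),
--         ('dining', 'restaurants'),
--         ('travel', 'airline'),
--         ('travel', 'lodging'),
--         ('travel', 'hotel'),
--         ('shop', 'shopping'),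
--         ('entertainment', 'movie'),
--         ('entertainment', 'theater'),
--         ('subscription', 'service'),
--         ('subscription', 'monthly'),
--         ('medical', 'health'),
--         ('transport', 'uber'),
--         ('transport', 'lyft'),
--         ('groceries', 'food')
--     ]
--
--     for w1 in words1:
--         for w2 in words2:
--             if (w1, w2) in related_pairs or (w2, w1) in related_pairs:
--                 return True
--
--     return False
-- ===== SOURCE B (Python) =====
-- RELATED_PAIRS = [
--     ('food', 'restaurants'),
--     ('food', 'dining'),
--     ('dining', 'restaurants'),
--     ('travel', 'airline'),
--     ('travel', 'lodging'),
--     ('travel', 'hotel'),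
--     ('shop', 'shopping'),
--     ('entertainment', 'movie'),
--     ('entertainment', 'theater'),
--     ('subscription', 'service'),
--     ('subscription', 'monthly'),
--     ('medical', 'health'),
--     ('transport', 'uber'),
--     ('transport', 'lyft'),
--     ('groceries', 'food')
-- ]
--
--
-- def similar_terms(term1, term2):
--     """Check if two terms might be similar or related"""
--     words1 = set(term1.lower().split())
--     words2 = set(term2.lower().split())
--     if words1 & words2:
--         return True
--     # single pass over the fixed relation table, probing the word sets
--     return any((a in words1 and b in words2) or (b in words1 and a in words2)
--                for a, b in RELATED_PAIRS)
-- ===== Notes on version B (the rewrite author's own statement) =====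
-- stated objective: simpler
-- what changed: The related-word phase is inverted: instead of scanning the cross-product of the two word sets and probing the pair list for each (w1,w2), B makes a single pass over the fixed RELATED_PAIRS table and probes the two word sets for each pair, expressed as an any() over the table.
import Mathlib
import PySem

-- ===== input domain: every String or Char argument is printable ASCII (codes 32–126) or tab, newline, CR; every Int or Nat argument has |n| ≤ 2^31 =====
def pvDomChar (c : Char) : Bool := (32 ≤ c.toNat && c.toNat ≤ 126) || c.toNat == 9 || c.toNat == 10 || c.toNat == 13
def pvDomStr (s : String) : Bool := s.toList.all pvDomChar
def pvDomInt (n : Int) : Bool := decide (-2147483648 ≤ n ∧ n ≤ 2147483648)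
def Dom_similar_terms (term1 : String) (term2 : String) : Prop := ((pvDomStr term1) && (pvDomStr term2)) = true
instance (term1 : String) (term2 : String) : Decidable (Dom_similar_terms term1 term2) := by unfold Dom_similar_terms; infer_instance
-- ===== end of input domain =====

-- B inverts the related-word phase: one pass over the fixed pair table probing the word
-- sets, instead of A's nested scan over the cross-product of the two word sets (simpler).


-- ===== PORT A =====
def similar_terms (term1 : String) (term2 : String) : Bool :=
  let words1 : PySem.Set String := PySem.Set.ofList (PySem.Str.split₀ (PySem.Str.lower term1))
  let words2 : PySem.Set String := PySem.Set.ofList (PySem.Str.split₀ (PySem.Str.lower term2))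
  let common_words := PySem.Set.inter words1 words2
  if common_words ≠ [] then
    true
  else
    let related_pairs : List (String × String) := [
      ("food", "restaurants"),
      ("food", "dining"),
      ("dining", "restaurants"),
      ("travel", "airline"),
      ("travel", "lodging"),
      ("travel", "hotel"),
      ("shop", "shopping"),
      ("entertainment", "movie"),
      ("entertainment", "theater"),
      ("subscription", "service"),
      ("subscription", "monthly"),
      ("medical", "health"),
      ("transport", "uber"),
      ("transport", "lyft"),
      ("groceries", "food")]
    -- break-on-first-hit over two set iterations: an existence test, independent of set order
    words1.any (fun w1 => words2.any (fun w2 =>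
      related_pairs.contains (w1, w2) || related_pairs.contains (w2, w1)))

-- ===== PORT B =====
def RELATED_PAIRS : List (String × String) := [
  ("food", "restaurants"),
  ("food", "dining"),
  ("dining", "restaurants"),
  ("travel", "airline"),
  ("travel", "lodging"),
  ("travel", "hotel"),
  ("shop", "shopping"),
  ("entertainment", "movie"),
  ("entertainment", "theater"),
  ("subscription", "service"),
  ("subscription", "monthly"),
  ("medical", "health"),
  ("transport", "uber"),
  ("transport", "lyft"),
  ("groceries", "food")]

def similar_terms_alt (term1 : String) (term2 : String) : Bool :=
  let words1 : PySem.Set String := PySem.Set.ofList (PySem.Str.split₀ (PySem.Str.lower term1))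
  let words2 : PySem.Set String := PySem.Set.ofList (PySem.Str.split₀ (PySem.Str.lower term2))
  if PySem.Set.inter words1 words2 ≠ [] then
    true
  else
    RELATED_PAIRS.any (fun p =>
      (words1.contains p.1 && words2.contains p.2) ||
      (words1.contains p.2 && words2.contains p.1))

-- ===== PRECONDITION & SPEC =====
def Spec_similar_terms (term1 : String) (term2 : String) (out : Bool) : Prop := out = similar_terms_alt term1 term2
instance (term1 : String) (term2 : String) (out : Bool) : Decidable (Spec_similar_terms term1 term2 out) := by unfold Spec_similar_terms; infer_instance

-- ===== CLAIM (what is proved, stated in full; the proofs are below) =====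
def Claim_equal_similar_terms : Prop := ∀ (term1 : String) (term2 : String), Dom_similar_terms term1 term2 → Spec_similar_terms term1 term2 (similar_terms term1 term2)

-- ===== LEMMAS AND PROOFS =====

-- the nested scan over the word lists probing the pair list equals the single pass
-- over the pair list probing the word lists: both decide the same existence statement
theorem swap_scan (pairs : List (String × String)) (ws1 ws2 : List String) :
    (ws1.any fun w1 => ws2.any fun w2 =>
        pairs.contains (w1, w2) || pairs.contains (w2, w1))
    = (pairs.any fun p =>
        (ws1.contains p.1 && ws2.contains p.2) || (ws1.contains p.2 && ws2.contains p.1)) := by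
  apply Bool.eq_iff_iff.mpr
  simp only [List.any_eq_true, List.contains_eq_mem, Bool.or_eq_true, Bool.and_eq_true,
    decide_eq_true_eq]
  constructor
  · rintro ⟨w1, h1, w2, h2, h | h⟩
    · exact ⟨(w1, w2), h, Or.inl ⟨h1, h2⟩⟩
    · exact ⟨(w2, w1), h, Or.inr ⟨h1, h2⟩⟩
  · rintro ⟨⟨a, b⟩, hp, ⟨h1, h2⟩ | ⟨h1, h2⟩⟩
    · exact ⟨a, h1, b, h2, Or.inl hp⟩
    · exact ⟨b, h1, a, h2, Or.inr hp⟩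

-- ===== VERDICT (by name: the statement is the Claim_ definition above) =====
theorem similar_terms_spec : Claim_equal_similar_terms := by
  intro term1 term2 _
  simp only [Spec_similar_terms, similar_terms, similar_terms_alt]
  by_cases h : PySem.Set.inter
      (PySem.Set.ofList (PySem.Str.split₀ (PySem.Str.lower term1)))
      (PySem.Set.ofList (PySem.Str.split₀ (PySem.Str.lower term2))) ≠ []
  · rw [if_pos h, if_pos h]
  · rw [if_neg h, if_neg h]
    rw [swap_scan]
    simp only [RELATED_PAIRS, PySem.Set.contains]
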